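-- pv_equiv track=rewrite | github.com/gmpify/advent-of-code | 2015/11/app.py | validate_increasing_three_letters
-- ===== SOURCE A (Python) =====
-- import string
--
-- def validate_increasing_three_letters(password):
--     substring_start = 0
--     substring_end = 3
--     while substring_end <= len(string.ascii_lowercase):
--         if string.ascii_lowercase[substring_start:substring_end] in password:
--             return True
--         substring_start += 1
--         substring_end += 1
--     return False
-- ===== SOURCE B (Python) =====
-- def validate_increasing_three_letters(password):
--     for a, b, c in zip(password, password[1:], password[2:]):
--         if 'a' <= a <= 'x' and ord(b) == ord(a) + 1 and ord(c) == ord(a) + 2: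
--             return True
--     return False
-- ===== Notes on version B (the rewrite author's own statement) =====
-- stated objective: simpler
-- what changed: Instead of generating all 24 alphabet triples and doing a substring search for each, B scans the password once and tests each 3-char window locally for being an increasing lowercase run.
import Mathlib
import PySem

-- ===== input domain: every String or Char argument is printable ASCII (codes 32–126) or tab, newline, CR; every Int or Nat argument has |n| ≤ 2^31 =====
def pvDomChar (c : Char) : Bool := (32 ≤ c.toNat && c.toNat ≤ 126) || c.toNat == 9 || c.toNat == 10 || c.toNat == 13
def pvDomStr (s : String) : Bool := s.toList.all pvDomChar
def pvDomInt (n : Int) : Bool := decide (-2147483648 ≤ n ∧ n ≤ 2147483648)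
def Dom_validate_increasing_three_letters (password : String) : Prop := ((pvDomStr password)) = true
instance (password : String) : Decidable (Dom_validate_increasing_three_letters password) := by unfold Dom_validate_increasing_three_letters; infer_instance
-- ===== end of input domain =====

-- B replaces A's 24 substring searches by one local-window scan of the password (objective: simpler).

-- ===== PORT A =====
-- string.ascii_lowercase
def pvAlpha : String := "abcdefghijklmnopqrstuvwxyz"

-- the while loop of A: substring_start = s, substring_end = s + 3, len(string.ascii_lowercase) = 26
def pvGoA (s : Nat) (password : String) : Bool :=
  if s + 3 ≤ 26 then
    if PySem.Str.isIn (PySem.Str.slice pvAlpha (some (s : Int)) (some ((s : Int) + 3))) password then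
      true
    else
      pvGoA (s + 1) password
  else
    false
termination_by 26 - s

def validate_increasing_three_letters (password : String) : Bool :=
  pvGoA 0 password

-- ===== PORT B =====
-- the window test of B: 'a' <= a <= 'x' and ord(b) == ord(a)+1 and ord(c) == ord(a)+2
def pvGood (a b c : Char) : Bool :=
  (97 ≤ a.toNat && a.toNat ≤ 120) && b.toNat == a.toNat + 1 && c.toNat == a.toNat + 2

-- the for loop of B over zip(password, password[1:], password[2:])
def pvGoB : List Char → Bool
  | a :: b :: c :: rest => if pvGood a b c then true else pvGoB (b :: c :: rest)
  | _ => false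

def validate_increasing_three_letters_alt (password : String) : Bool :=
  pvGoB password.toList

-- ===== PRECONDITION & SPEC =====
def Spec_validate_increasing_three_letters (password : String) (out : Bool) : Prop := out = validate_increasing_three_letters_alt password
instance (password : String) (out : Bool) : Decidable (Spec_validate_increasing_three_letters password out) := by unfold Spec_validate_increasing_three_letters; infer_instance

-- ===== CLAIM (what is proved, stated in full; the proofs are below) =====
def Claim_equal_validate_increasing_three_letters : Prop := ∀ (password : String), Dom_validate_increasing_three_letters password → Spec_validate_increasing_three_letters password (validate_increasing_three_letters password)

-- ===== LEMMAS AND PROOFS =====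

-- A's slice, on the character-list side
lemma pvSlice_toList (t : Nat) :
    (PySem.Str.slice pvAlpha (some (t : Int)) (some ((t : Int) + 3))).toList
      = (pvAlpha.toList.drop t).take 3 := by
  rw [PySem.Str.toList_slice]
  have h3 : ((t : Int) + 3) = ((t : Int) + ((3 : Nat) : Int)) := by norm_num
  rw [h3]
  exact PySem.List.slice_natCast_add pvAlpha.toList t 3

-- the triple A searches for at start index t, as a list of character codes
lemma pvSlice_codes : ∀ t : Nat, t < 24 →
    ((pvAlpha.toList.drop t).take 3).map Char.toNat = [97 + t, 98 + t, 99 + t] := by decide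

lemma pvChar_toNat_injective : Function.Injective Char.toNat :=
  StrictMono.injective fun _ _ h => h

-- characterization of B's loop
lemma pvGoB_iff (l : List Char) :
    pvGoB l = true ↔ ∃ a b c : Char, pvGood a b c = true ∧ [a, b, c] <:+: l := by
  induction l using pvGoB.induct with
  | case1 a b c rest hg =>
      simp only [pvGoB, hg, if_true, true_iff]
      exact ⟨a, b, c, hg, ⟨[], rest, by simp⟩⟩
  | case2 a b c rest hg ih =>
      simp only [pvGoB, hg, if_false, Bool.false_eq_true]
      rw [ih]
      constructor
      · rintro ⟨x, y, z, hx, hinf⟩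
        exact ⟨x, y, z, hx, hinf.trans ⟨[a], [], by simp⟩⟩
      · rintro ⟨x, y, z, hx, hinf⟩
        rcases List.infix_cons_iff.mp hinf with hpre | hinf'
        · obtain ⟨h1, hpre2⟩ := List.cons_prefix_cons.mp hpre
          obtain ⟨h2, hpre3⟩ := List.cons_prefix_cons.mp hpre2
          obtain ⟨h3, -⟩ := List.cons_prefix_cons.mp hpre3
          subst h1; subst h2; subst h3
          exact absurd hx hg
        · exact ⟨x, y, z, hx, hinf'⟩
  | case3 l hshape =>
      have hshort : l.length < 3 := by
        rcases l with _ | ⟨x, _ | ⟨y, _ | ⟨z, r⟩⟩⟩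
        · simp
        · simp
        · simp
        · exact absurd rfl (hshape x y z r)
      constructor
      · intro h
        exfalso
        rcases l with _ | ⟨x, _ | ⟨y, _ | ⟨z, r⟩⟩⟩
        · simp [pvGoB] at h
        · simp [pvGoB] at h
        · simp [pvGoB] at h
        · exact hshape x y z r rfl
      · rintro ⟨a, b, c, _, hinf⟩
        have hlen := hinf.length_le
        simp at hlen
        omega

-- characterization of A's loop, by downward induction on the start index
lemma pvGoA_iff (pw : String) : ∀ k s, 26 - s ≤ k →
    (pvGoA s pw = true ↔ ∃ t, s ≤ t ∧ t < 24 ∧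
      (PySem.Str.slice pvAlpha (some (t : Int)) (some ((t : Int) + 3))).toList <:+: pw.toList) := by
  intro k
  induction k with
  | zero =>
      intro s hs
      have h26 : 26 ≤ s := by omega
      rw [pvGoA]
      simp only [if_neg (by omega : ¬ s + 3 ≤ 26)]
      constructor
      · intro h; simp at h
      · rintro ⟨t, hst, ht, _⟩; omega
  | succ k ih =>
      intro s hs
      rw [pvGoA]
      by_cases hle : s + 3 ≤ 26
      · simp only [if_pos hle]
        by_cases hin : PySem.Str.isIn (PySem.Str.slice pvAlpha (some (s : Int)) (some ((s : Int) + 3))) pw = true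
        · simp only [hin, if_true, true_iff]
          exact ⟨s, le_refl s, by omega, (PySem.Str.isIn_iff_infix _ _).mp hin⟩
        · simp only [hin, if_false, Bool.false_eq_true]
          rw [ih (s + 1) (by omega)]
          constructor
          · rintro ⟨t, hst, ht, hinf⟩; exact ⟨t, by omega, ht, hinf⟩
          · rintro ⟨t, hst, ht, hinf⟩
            rcases Nat.lt_or_ge s t with h | h
            · exact ⟨t, by omega, ht, hinf⟩
            · have : t = s := by omega
              subst this
              exact absurd ((PySem.Str.isIn_iff_infix _ _).mpr hinf) hin
      · simp only [if_neg hle]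
        constructor
        · intro h; simp at h
        · rintro ⟨t, hst, ht, _⟩; omega

-- the bridge: a triple of A at index t is exactly a good window of B
lemma pvTriple_eq_iff (a b c : Char) :
    (∃ t : Nat, t < 24 ∧
      (PySem.Str.slice pvAlpha (some (t : Int)) (some ((t : Int) + 3))).toList = [a, b, c])
      ↔ pvGood a b c = true := by
  constructor
  · rintro ⟨t, ht, heq⟩
    rw [pvSlice_toList] at heq
    have hmap := pvSlice_codes t ht
    rw [heq] at hmap
    simp only [List.map, List.cons.injEq] at hmap
    simp only [pvGood, Bool.and_eq_true, decide_eq_true_eq, beq_iff_eq]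
    omega
  · intro hg
    simp only [pvGood, Bool.and_eq_true, decide_eq_true_eq, beq_iff_eq] at hg
    refine ⟨a.toNat - 97, by omega, ?_⟩
    rw [pvSlice_toList]
    apply List.map_injective_iff.mpr pvChar_toNat_injective
    rw [pvSlice_codes (a.toNat - 97) (by omega)]
    simp only [List.map_cons, List.map_nil, List.cons.injEq, and_true]
    omega

-- ===== VERDICT (by name: the statement is the Claim_ definition above) =====
theorem validate_increasing_three_letters_spec : Claim_equal_validate_increasing_three_letters := by
  intro password _
  unfold Spec_validate_increasing_three_letters
  unfold validate_increasing_three_letters validate_increasing_three_letters_alt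
  rw [Bool.eq_iff_iff]
  rw [pvGoA_iff password 26 0 (by omega), pvGoB_iff]
  constructor
  · rintro ⟨t, _, ht, hinf⟩
    have hlen : (PySem.Str.slice pvAlpha (some (t : Int)) (some ((t : Int) + 3))).toList.length = 3 := by
      have := congrArg List.length (pvSlice_codes t ht)
      rw [pvSlice_toList]
      simpa using this
    obtain ⟨a, b, c, heq⟩ := List.length_eq_three.mp hlen
    rw [heq] at hinf
    exact ⟨a, b, c, (pvTriple_eq_iff a b c).mp ⟨t, ht, heq⟩, hinf⟩
  · rintro ⟨a, b, c, hg, hinf⟩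
    rcases (pvTriple_eq_iff a b c).mpr hg with ⟨t, ht, heq⟩
    exact ⟨t, Nat.zero_le t, ht, by rw [heq]; exact hinf⟩
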